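-- pv_equiv track=rewrite | github.com/VisionExpo/intervux-ai | backend/services/viseme_service.py | generate
-- ===== SOURCE A (Python) =====
-- from typing import List, Dict
--
-- def generate(
--
--     audio_duration_ms: int,
--     frame_interval_ms: int = 120,
-- ) -> List[Dict[str, int]]:
--     """
--     Generate a simple viseme timeline.
--
--     Returns a list of:
--     {
--         "time_ms": int,
--         "mouth_open": int  # 0 or 1
--     }
--     """
--
--     visemes = []
--     time_ms = 0
--     open_state = 1
--
--     while time_ms < audio_duration_ms:
--         visemes.append({
--             "time_ms": time_ms,
--             "mouth_open": open_state,
--         })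
--
--         # Alternate open / close
--         open_state = 1 - open_state
--         time_ms += frame_interval_ms
--
--     return visemes
-- ===== SOURCE B (Python) =====
-- def generate(audio_duration_ms, frame_interval_ms=120):
--     """Build the timeline by repeated doubling of a block (shift times, flip
--     parity), then drop frames past the end; no running accumulators."""
--     if frame_interval_ms <= 0 or audio_duration_ms <= 0:
--         return []
--     frames = [{"time_ms": 0, "mouth_open": 1}]
--     while len(frames) * frame_interval_ms < audio_duration_ms:
--         off = len(frames) * frame_interval_ms
--         flip = len(frames) % 2
--         frames = frames + [{"time_ms": fr["time_ms"] + off,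
--                             "mouth_open": (fr["mouth_open"] + flip) % 2}
--                            for fr in frames]
--     return [fr for fr in frames if fr["time_ms"] < audio_duration_ms]
-- ===== Notes on version B (the rewrite author's own statement) =====
-- stated objective: alternative
-- what changed: Instead of stepping frame by frame with running time_ms/open_state accumulators, B builds the timeline by repeatedly doubling a block (append a time-shifted, parity-flipped copy of the frames built so far) until it spans the duration, then drops the frames past the end.
-- outside the precondition, e.g. on generate(500, 0): A does not finish within the time limit, B returns []; on generate(500, -120): A does not finish within the time limit, B returns []
import Mathlib
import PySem

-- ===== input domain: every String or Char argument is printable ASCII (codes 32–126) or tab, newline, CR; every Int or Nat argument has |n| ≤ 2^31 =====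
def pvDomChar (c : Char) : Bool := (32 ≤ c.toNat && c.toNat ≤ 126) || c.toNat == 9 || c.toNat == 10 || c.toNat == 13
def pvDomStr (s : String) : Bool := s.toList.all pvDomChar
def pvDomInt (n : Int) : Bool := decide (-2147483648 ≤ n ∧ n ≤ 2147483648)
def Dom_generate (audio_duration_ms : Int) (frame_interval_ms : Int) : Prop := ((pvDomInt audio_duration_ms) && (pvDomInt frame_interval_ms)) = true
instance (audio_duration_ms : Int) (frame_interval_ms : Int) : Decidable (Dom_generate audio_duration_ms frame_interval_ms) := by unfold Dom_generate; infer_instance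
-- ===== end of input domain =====

-- B replaces A's frame-by-frame accumulator loop by repeated doubling of a block
-- (append a shifted, parity-flipped copy) plus a final cut (objective: alternative).

-- ===== PORT A =====
-- A's while-loop; the fuel only makes the recursion total — inside Pre_ (0 < interval
-- or duration ≤ 0) it is never exhausted (A diverges for interval ≤ 0 < duration).
def generateLoop (dur f : Int) : Nat → Int → Int → List (List (String × Int))
  | 0, _, _ => []
  | fuel + 1, t, o =>
    if t < dur then
      [("time_ms", t), ("mouth_open", o)] :: generateLoop dur f fuel (t + f) (1 - o)
    else []

def generate (audio_duration_ms : Int) (frame_interval_ms : Int) : List (List (String × Int)) :=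
  generateLoop audio_duration_ms frame_interval_ms (audio_duration_ms.toNat + 1) 0 1

-- ===== PORT B =====
-- fr["time_ms"] on B's frame dicts: first-match lookup; the key is always present,
-- so the `.getD 0` default is never used (exact here).
def dget (fr : List (String × Int)) (k : String) : Int := (fr.lookup k).getD 0

-- B's doubling while-loop; fuel only for totality (the block at least doubles each
-- round, so inside Pre_ the fuel is never exhausted).
def genBLoop (dur f : Int) : Nat → List (List (String × Int)) → List (List (String × Int))
  | 0, frames => frames
  | fuel + 1, frames =>
    if (frames.length : Int) * f < dur then
      let off : Int := (frames.length : Int) * f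
      let flip : Int := PySem.Int.mod (frames.length : Int) 2
      genBLoop dur f fuel (frames ++ frames.map (fun fr =>
        [("time_ms", dget fr "time_ms" + off),
         ("mouth_open", PySem.Int.mod (dget fr "mouth_open" + flip) 2)]))
    else frames

def generate_alt (audio_duration_ms : Int) (frame_interval_ms : Int) : List (List (String × Int)) :=
  if frame_interval_ms ≤ 0 ∨ audio_duration_ms ≤ 0 then []
  else
    (genBLoop audio_duration_ms frame_interval_ms (audio_duration_ms.toNat + 1)
        [[("time_ms", 0), ("mouth_open", 1)]]).filter
      (fun fr => decide (dget fr "time_ms" < audio_duration_ms))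

-- ===== PRECONDITION & SPEC =====
-- Pre_ excludes exactly the inputs where A never returns (the while-loop diverges
-- when frame_interval_ms ≤ 0 and audio_duration_ms > 0).
def Pre_generate (audio_duration_ms : Int) (frame_interval_ms : Int) : Prop :=
  0 < frame_interval_ms ∨ audio_duration_ms ≤ 0
instance (audio_duration_ms : Int) (frame_interval_ms : Int) : Decidable (Pre_generate audio_duration_ms frame_interval_ms) := by unfold Pre_generate; infer_instance

def pvWitness_generate : Int × Int := (500, 120)

def Spec_generate (audio_duration_ms : Int) (frame_interval_ms : Int) (out : List (List (String × Int))) : Prop := out = generate_alt audio_duration_ms frame_interval_ms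
instance (audio_duration_ms : Int) (frame_interval_ms : Int) (out : List (List (String × Int))) : Decidable (Spec_generate audio_duration_ms frame_interval_ms out) := by unfold Spec_generate; infer_instance

-- ===== CLAIM =====
def Claim_equal_generate : Prop := ∀ (audio_duration_ms : Int) (frame_interval_ms : Int), Dom_generate audio_duration_ms frame_interval_ms → Pre_generate audio_duration_ms frame_interval_ms → Spec_generate audio_duration_ms frame_interval_ms (generate audio_duration_ms frame_interval_ms)

-- ===== LEMMAS AND PROOFS =====

-- the i-th frame of the timeline
def fA (f : Int) (i : Nat) : List (String × Int) :=
  [("time_ms", (i : Int) * f), ("mouth_open", 1 - PySem.Int.mod (i : Int) 2)]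

lemma dget_time (f : Int) (i : Nat) : dget (fA f i) "time_ms" = (i : Int) * f := rfl

lemma dget_open (f : Int) (i : Nat) :
    dget (fA f i) "mouth_open" = 1 - PySem.Int.mod (i : Int) 2 := rfl

lemma mod_flip (L i : Nat) :
    PySem.Int.mod ((1 - PySem.Int.mod (i : Int) 2) + PySem.Int.mod (L : Int) 2) 2
      = 1 - PySem.Int.mod ((L : Int) + (i : Int)) 2 := by
  rw [PySem.Int.mod_eq_emod_of_pos (b := 2) (by norm_num),
      PySem.Int.mod_eq_emod_of_pos (b := 2) (by norm_num),
      PySem.Int.mod_eq_emod_of_pos (b := 2) (by norm_num),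
      PySem.Int.mod_eq_emod_of_pos (b := 2) (by norm_num)]
  omega

-- one doubling step: block of L index-frames becomes the block of 2L index-frames
lemma double_step (f : Int) (L : Nat) :
    ((List.range L).map (fA f)) ++ ((List.range L).map (fA f)).map (fun fr =>
        [("time_ms", dget fr "time_ms" + (L : Int) * f),
         ("mouth_open", PySem.Int.mod (dget fr "mouth_open" + PySem.Int.mod (L : Int) 2) 2)])
      = (List.range (L + L)).map (fA f) := by
  rw [List.range_add, List.map_append, List.map_map, List.map_map]
  congr 1
  apply List.map_congr_left
  intro i _
  show [("time_ms", dget (fA f i) "time_ms" + (L : Int) * f),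
        ("mouth_open", PySem.Int.mod (dget (fA f i) "mouth_open" + PySem.Int.mod (L : Int) 2) 2)]
      = fA f (L + i)
  rw [dget_time, dget_open, mod_flip]
  have ht : (i : Int) * f + (L : Int) * f = ((L + i : Nat) : Int) * f := by push_cast; ring
  have hm : ((L : Int) + (i : Int)) = ((L + i : Nat) : Int) := by push_cast; ring
  rw [ht, hm]
  rfl

-- B's loop keeps the "block = index frames" invariant and ends with a full block
lemma genBLoop_eq (d f : Int) :
    ∀ (fuel L : Nat), 1 ≤ L → 0 < f → d ≤ ((L : Int) + (fuel : Int)) * f →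
      ∃ M : Nat, L ≤ M ∧ d ≤ (M : Int) * f ∧
        genBLoop d f fuel ((List.range L).map (fA f)) = (List.range M).map (fA f) := by
  intro fuel
  induction fuel with
  | zero =>
    intro L hL hf hd
    exact ⟨L, le_rfl, by simpa using hd, rfl⟩
  | succ m ih =>
    intro L hL hf hd
    rw [genBLoop]
    simp only [List.length_map, List.length_range]
    by_cases h : (L : Int) * f < d
    · rw [if_pos h, double_step]
      have hstep : d ≤ (((L + L : Nat) : Int) + (m : Int)) * f := by
        refine le_trans hd (mul_le_mul_of_nonneg_right ?_ (le_of_lt hf))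
        push_cast
        omega
      obtain ⟨M, hLM, hdM, heq⟩ := ih (L + L) (by omega) hf hstep
      exact ⟨M, by omega, hdM, heq⟩
    · rw [if_neg h]
      exact ⟨L, le_rfl, by omega, rfl⟩

-- cutting a full block down to exactly the first nNat frames
lemma filter_block (d f : Int) (nNat M : Nat)
    (key : ∀ i : Nat, ((i : Int) * f < d ↔ i < nNat)) (hMn : nNat ≤ M) :
    ((List.range M).map (fA f)).filter (fun fr => decide (dget fr "time_ms" < d))
      = (List.range nNat).map (fA f) := by
  have hM : M = nNat + (M - nNat) := by omega
  rw [hM, List.range_add, List.map_append, List.filter_append]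
  have h1 : ((List.range nNat).map (fA f)).filter
      (fun fr => decide (dget fr "time_ms" < d)) = (List.range nNat).map (fA f) := by
    apply List.filter_eq_self.mpr
    intro fr hfr
    obtain ⟨i, hi, rfl⟩ := List.mem_map.mp hfr
    simp only [dget_time, decide_eq_true_eq]
    exact (key i).mpr (List.mem_range.mp hi)
  have h2 : ((List.range (M - nNat)).map (fA f ∘ fun i => nNat + i)).filter
      (fun fr => decide (dget fr "time_ms" < d)) = [] := by
    apply List.filter_eq_nil_iff.mpr
    intro fr hfr
    obtain ⟨i, hi, rfl⟩ := List.mem_map.mp hfr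
    simp only [Function.comp_apply, dget_time, decide_eq_true_eq]
    intro hlt
    have := (key (nNat + i)).mp hlt
    omega
  rw [List.map_map, h1, h2, List.append_nil]

-- A's loop from frame index k produces frames k, k+1, …, nNat-1
lemma generateLoop_eq (d f : Int) (nNat : Nat)
    (key : ∀ i : Nat, ((i : Int) * f < d ↔ i < nNat)) :
    ∀ (fuel k : Nat), nNat ≤ k + fuel →
      generateLoop d f fuel ((k : Int) * f) (1 - PySem.Int.mod (k : Int) 2)
        = (List.range (nNat - k)).map (fun j => fA f (k + j)) := by
  intro fuel
  induction fuel with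
  | zero =>
    intro k hk
    have h0 : nNat - k = 0 := by omega
    simp [generateLoop, h0]
  | succ m ih =>
    intro k hk
    rw [generateLoop]
    by_cases h : (k : Int) * f < d
    · have hkn : k < nNat := (key k).mp h
      rw [if_pos h]
      have hrange : nNat - k = (nNat - (k + 1)) + 1 := by omega
      rw [hrange, List.range_succ_eq_map, List.map_cons, List.map_map]
      have hhead : fA f (k + 0) = [("time_ms", (k : Int) * f), ("mouth_open", 1 - PySem.Int.mod (k : Int) 2)] := by
        simp [fA]
      have harg : (k : Int) * f + f = ((k + 1 : Nat) : Int) * f := by push_cast; ring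
      have hflip : 1 - (1 - PySem.Int.mod (k : Int) 2) = 1 - PySem.Int.mod ((k + 1 : Nat) : Int) 2 := by
        rw [PySem.Int.mod_eq_emod_of_pos (b := 2) (by norm_num),
            PySem.Int.mod_eq_emod_of_pos (b := 2) (by norm_num)]
        push_cast
        omega
      rw [hhead, harg, hflip, ih (k + 1) (by omega)]
      congr 1
      apply List.map_congr_left
      intro j _
      simp [Function.comp]
      congr 1
      omega
    · have hkn : ¬ k < nNat := fun hlt => h ((key k).mpr hlt)
      rw [if_neg h]
      have : nNat - k = 0 := by omega
      simp [this]

theorem generate_spec : Claim_equal_generate := by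
  intro d f _ hpre
  unfold Spec_generate generate generate_alt
  by_cases hd : d ≤ 0
  · rw [if_pos (Or.inr hd)]
    have h1 : d.toNat + 1 = 1 := by omega
    rw [h1, generateLoop, if_neg (by omega)]
  · have hd' : 0 < d := by omega
    have hf : 0 < f := by
      rcases hpre with h | h
      · exact h
      · omega
    rw [if_neg (by omega)]
    set n := -(PySem.Int.floordiv (-d) f) with hndef
    have hn := (PySem.Int.neg_floordiv_neg_eq_iff_of_pos (a := d) (b := f) (q := n) hf).mp rfl
    have hnpos : 0 < n := by
      by_contra hcon
      have h0 : n ≤ 0 := by omega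
      have := mul_le_mul_of_nonneg_right h0 (le_of_lt hf)
      simp at this
      linarith [hn.2]
    set nNat := n.toNat with hnNat
    have hcast : (nNat : Int) = n := Int.toNat_of_nonneg (le_of_lt hnpos)
    have key : ∀ i : Nat, ((i : Int) * f < d ↔ i < nNat) := by
      intro i
      constructor
      · intro h
        by_contra hn2
        have h2 : (nNat : Int) ≤ (i : Int) := by exact_mod_cast Nat.le_of_not_lt hn2
        rw [hcast] at h2
        have := mul_le_mul_of_nonneg_right h2 (le_of_lt hf)
        linarith [hn.2]
      · intro h
        have h2 : (i : Int) ≤ n - 1 := by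
          have : (i : Int) < (nNat : Int) := by exact_mod_cast h
          omega
        have := mul_le_mul_of_nonneg_right h2 (le_of_lt hf)
        have hexp : (n - 1) * f < d := hn.1
        linarith
    have hnd : n ≤ d := by
      have e1 : (n - 1) * 1 ≤ (n - 1) * f := by
        apply mul_le_mul_of_nonneg_left (by linarith) (by omega)
      simp at e1
      linarith [hn.1]
    -- A side
    have hA := generateLoop_eq d f nNat key (d.toNat + 1) 0 (by omega)
    have hm0 : PySem.Int.mod (0 : Int) 2 = 0 := by decide
    simp only [Nat.cast_zero, zero_mul, hm0, sub_zero, Nat.sub_zero, Nat.zero_add] at hA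
    rw [hA]
    -- B side
    have hinit : [[(("time_ms" : String), (0 : Int)), ("mouth_open", 1)]]
        = (List.range 1).map (fA f) := by
      simp [fA]
    have hfuel : d ≤ (((1 : Nat) : Int) + ((d.toNat + 1 : Nat) : Int)) * f := by
      have hc : ((1 : Nat) : Int) + ((d.toNat + 1 : Nat) : Int) = d + 2 := by push_cast; omega
      rw [hc]
      have hb2 := mul_le_mul_of_nonneg_left (show (1 : Int) ≤ f by omega)
        (show (0 : Int) ≤ d + 2 by omega)
      rw [mul_one] at hb2
      linarith
    obtain ⟨M, hLM, hdM, heq⟩ := genBLoop_eq d f (d.toNat + 1) 1 le_rfl hf hfuel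
    rw [hinit, heq]
    have hMn : nNat ≤ M := by
      by_contra hM2
      have := (key M).mpr (Nat.lt_of_not_le hM2)
      linarith
    rw [filter_block d f nNat M key hMn]
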